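-- pv_equiv track=rewrite | github.com/GinoLongobucco/SaaSGenius | models/advanced_prompt_engineering.py | _format_features_for_roadmap
-- ===== SOURCE A (Python) =====
-- from typing import Dict, List, Any, Optional
--
-- def _format_features_for_roadmap(features: List[str]) -> str:
--     """Formatea características para roadmap"""
--     if not features:
--         return "**Características:** Core SaaS features - auth, dashboard, basic analytics."
--
--     # Categorizar por complejidad para roadmap
--     complexity_map = {
--         'MVP': [],
--         'Standard': [],
--         'Advanced': []
--     }
--
--     for feature in features:
--         feature_lower = feature.lower()
--         if any(term in feature_lower for term in ['auth', 'login', 'usuario', 'dashboard']):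
--             complexity_map['MVP'].append(feature)
--         elif any(term in feature_lower for term in ['api', 'integra', 'report', 'analytic']):
--             complexity_map['Standard'].append(feature)
--         else:
--             complexity_map['Advanced'].append(feature)
--
--     formatted = []
--     for complexity, items in complexity_map.items():
--         if items:
--             formatted.append(f"**{complexity}:** {', '.join(items)}")
--
--     return '\n'.join(formatted)
-- ===== SOURCE B (Python) =====
-- def _format_features_for_roadmap(features):
--     if not features:
--         return "**Características:** Core SaaS features - auth, dashboard, basic analytics."
--
--     def classify(feature):
--         fl = feature.lower()
--         if any(t in fl for t in ('auth', 'login', 'usuario', 'dashboard')):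
--             return 'MVP'
--         if any(t in fl for t in ('api', 'integra', 'report', 'analytic')):
--             return 'Standard'
--         return 'Advanced'
--
--     lines = []
--     for cat in ('MVP', 'Standard', 'Advanced'):
--         items = [f for f in features if classify(f) == cat]
--         if items:
--             lines.append(f"**{cat}:** {', '.join(items)}")
--     return '\n'.join(lines)
-- ===== Notes on version B (the rewrite author's own statement) =====
-- stated objective: alternative
-- what changed: Replaces A's single pass that distributes features into a dict of three buckets with a classify(feature) helper plus three per-category filter scans over the feature list in the fixed order MVP/Standard/Advanced.
import Mathlib
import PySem

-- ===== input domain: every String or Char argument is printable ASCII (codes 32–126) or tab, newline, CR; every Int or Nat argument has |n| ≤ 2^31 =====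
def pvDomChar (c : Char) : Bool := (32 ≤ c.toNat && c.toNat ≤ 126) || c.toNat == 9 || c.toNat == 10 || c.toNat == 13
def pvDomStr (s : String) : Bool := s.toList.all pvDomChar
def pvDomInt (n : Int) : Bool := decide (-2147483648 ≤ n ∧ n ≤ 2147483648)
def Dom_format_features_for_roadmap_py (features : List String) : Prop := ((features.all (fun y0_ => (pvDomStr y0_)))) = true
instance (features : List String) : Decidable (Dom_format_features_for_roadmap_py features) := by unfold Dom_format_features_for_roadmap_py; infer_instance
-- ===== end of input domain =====

-- B replaces A's single distributing pass over a dict of buckets by a classify() helper and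
-- three per-category filter scans in the fixed category order (objective: alternative, same cost).

-- the two branch tests 'any(term in feature.lower() for term in [...])', named once and used by both ports
def pvIsMvp (f : String) : Bool :=
  ["auth", "login", "usuario", "dashboard"].any (fun t => PySem.Str.isIn t (PySem.Str.lower f))
def pvIsStd (f : String) : Bool :=
  ["api", "integra", "report", "analytic"].any (fun t => PySem.Str.isIn t (PySem.Str.lower f))

-- ===== PORT A =====
-- A's single pass distributes each feature into one of three buckets; the dict with the
-- fixed keys 'MVP','Standard','Advanced' is carried as a triple of lists, in key order.
def format_features_for_roadmap_py (features : List String) : String :=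
  if features.isEmpty then
    "**Características:** Core SaaS features - auth, dashboard, basic analytics."
  else
    let m := features.foldl
      (fun (acc : List String × List String × List String) feature =>
        if pvIsMvp feature then (acc.1 ++ [feature], acc.2.1, acc.2.2)
        else if pvIsStd feature then (acc.1, acc.2.1 ++ [feature], acc.2.2)
        else (acc.1, acc.2.1, acc.2.2 ++ [feature]))
      ([], [], [])
    let formatted := [("MVP", m.1), ("Standard", m.2.1), ("Advanced", m.2.2)].foldl
      (fun (acc : List String) p =>
        if p.2.isEmpty then acc
        else acc ++ ["**" ++ p.1 ++ ":** " ++ PySem.Str.join ", " p.2]) []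
    PySem.Str.join "\n" formatted

-- ===== PORT B =====
def pvClassify (feature : String) : String :=
  if pvIsMvp feature then "MVP"
  else if pvIsStd feature then "Standard"
  else "Advanced"

def format_features_for_roadmap_py_alt (features : List String) : String :=
  if features.isEmpty then
    "**Características:** Core SaaS features - auth, dashboard, basic analytics."
  else
    PySem.Str.join "\n"
      ((["MVP", "Standard", "Advanced"]).filterMap (fun cat =>
        let items := features.filter (fun f => pvClassify f == cat)
        if items.isEmpty then none
        else some ("**" ++ cat ++ ":** " ++ PySem.Str.join ", " items)))

-- ===== PRECONDITION & SPEC =====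
def Spec_format_features_for_roadmap_py (features : List String) (out : String) : Prop := out = format_features_for_roadmap_py_alt features
instance (features : List String) (out : String) : Decidable (Spec_format_features_for_roadmap_py features out) := by unfold Spec_format_features_for_roadmap_py; infer_instance

-- ===== CLAIM (what is proved, stated in full; the proofs are below) =====
def Claim_equal_format_features_for_roadmap_py : Prop := ∀ (features : List String), Dom_format_features_for_roadmap_py features → Spec_format_features_for_roadmap_py features (format_features_for_roadmap_py features)

-- ===== LEMMAS AND PROOFS =====

-- A's distributing pass computes the three filters (invariant, generalized accumulator)
theorem pv_foldl_eq_filters (features : List String) (a b c : List String) :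
    features.foldl
      (fun (acc : List String × List String × List String) feature =>
        if pvIsMvp feature then (acc.1 ++ [feature], acc.2.1, acc.2.2)
        else if pvIsStd feature then (acc.1, acc.2.1 ++ [feature], acc.2.2)
        else (acc.1, acc.2.1, acc.2.2 ++ [feature]))
      (a, b, c)
    = (a ++ features.filter pvIsMvp,
       b ++ features.filter (fun f => !pvIsMvp f && pvIsStd f),
       c ++ features.filter (fun f => !pvIsMvp f && !pvIsStd f)) := by
  induction features generalizing a b c with
  | nil => simp
  | cons x xs ih =>
    simp only [List.foldl_cons, List.filter_cons]
    by_cases h1 : pvIsMvp x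
    · simp [h1, ih]
    · by_cases h2 : pvIsStd x
      · simp [h1, h2, ih]
      · simp [h1, h2, ih]

theorem pv_classify_mvp (f : String) : (pvClassify f == "MVP") = pvIsMvp f := by
  unfold pvClassify; split_ifs with h1 h2 <;> simp_all

theorem pv_classify_std (f : String) :
    (pvClassify f == "Standard") = (!pvIsMvp f && pvIsStd f) := by
  unfold pvClassify; split_ifs with h1 h2 <;> simp_all

theorem pv_classify_adv (f : String) :
    (pvClassify f == "Advanced") = (!pvIsMvp f && !pvIsStd f) := by
  unfold pvClassify; split_ifs with h1 h2 <;> simp_all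

-- ===== VERDICT (by name: the statement is the Claim_ definition above) =====
theorem format_features_for_roadmap_py_spec : Claim_equal_format_features_for_roadmap_py := by
  intro features _
  unfold Spec_format_features_for_roadmap_py
  unfold format_features_for_roadmap_py format_features_for_roadmap_py_alt
  by_cases h : features.isEmpty
  · simp [h]
  · simp only [h, Bool.false_eq_true, if_false, pv_foldl_eq_filters features [] [] []]
    have hm : features.filter (fun f => pvClassify f == "MVP") = features.filter pvIsMvp :=
      List.filter_congr (fun f _ => pv_classify_mvp f)
    have hs : features.filter (fun f => pvClassify f == "Standard")
        = features.filter (fun f => !pvIsMvp f && pvIsStd f) :=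
      List.filter_congr (fun f _ => pv_classify_std f)
    have ha : features.filter (fun f => pvClassify f == "Advanced")
        = features.filter (fun f => !pvIsMvp f && !pvIsStd f) :=
      List.filter_congr (fun f _ => pv_classify_adv f)
    simp only [List.filterMap_cons, List.filterMap_nil, List.foldl_cons, List.foldl_nil,
      List.nil_append, hm, hs, ha]
    split_ifs <;> simp_all
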